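-- pv_equiv track=rewrite | github.com/natasha1013/Python-Scheduling-Algorithm | SchedulingAlgoFinal.py | sjn
-- ===== SOURCE A (Python) =====
-- def sjn(processes, burst_times, arrival_times):
--     n = len(processes) # number of processes
--     remaining_burst = burst_times[:] # copy of burst time
--     turnaround_times = [0] * n  # Turnaround times for each process
--     waiting_times = [0] * n  # Waiting times for each process
--     completion_times = [0] * n  # Completion times for each process
--     time = 0  # Current time in the simulation
--     queue = []  # Queue to manage the processes in round-robin order
--     in_queue = [False] * n  # Track whether a process is in the queue
--     execution_log = []  # Log to store the execution order and time intervals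
--
--     while True:
--         done = True # Flag to check if all processes are completed
--
--         # Add processes to the queue that have arrived and are not already in it
--         for i in range(n):
--             if arrival_times[i] <= time and not in_queue[i] and remaining_burst[i] > 0:
--                 queue.append(i)
--                 in_queue[i] = True
--
--         # If the queue is empty and there are still processes to complete, move the time forward
--         if not queue and any(remaining_burst):
--             time += 1
--             continue
--
--         # Process the first process in the queue
--         if queue:
--
--             # Sort queue based on remaining burst time (Shortest Job Next)
--             queue.sort(key=lambda x: remaining_burst[x])
--             current = queue.pop(0)  # Get the process with the shortest burst time
--             done = False
--
--             # Process the selected process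
--             remaining_burst[current] = 0  # Mark the burst time as completed
--             completion_times[current] = time + burst_times[current]  # Set completion time
--             turnaround_times[current] = completion_times[current] - arrival_times[current]  # Calculate turnaround time
--             waiting_times[current] = turnaround_times[current] - burst_times[current]  # Calculate waiting time
--
--             # Add the execution log with the process name and the time interval it was executed
--             execution_log.append((processes[current], time, time + burst_times[current]))
--
--             # update the current time
--             time += burst_times[current]
--
--         if done:
--             break
--
--     return completion_times, turnaround_times, waiting_times, execution_log
-- ===== SOURCE B (Python) =====
-- def sjn(processes, burst_times, arrival_times):
--     # Event-driven shortest-job-next: jump time straight to the next arrival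
--     # instead of stepping +1, and pick the next job by an explicit
--     # (burst, time-it-became-ready, index) key instead of re-sorting a queue.
--     n = len(processes)
--     completion_times = [0] * n
--     turnaround_times = [0] * n
--     waiting_times = [0] * n
--     execution_log = []
--     pending = sorted((i for i in range(n) if burst_times[i] > 0),
--                      key=lambda i: arrival_times[i])
--     ready = {}  # process index -> time at which it entered the ready pool
--     time = 0
--     while pending or ready:
--         if not ready and arrival_times[pending[0]] > time:
--             time = arrival_times[pending[0]]  # jump to the next arrival
--         while pending and arrival_times[pending[0]] <= time:
--             ready[pending.pop(0)] = time
--         cur = min(ready, key=lambda i: (burst_times[i], ready[i], i))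
--         del ready[cur]
--         finish = time + burst_times[cur]
--         completion_times[cur] = finish
--         turnaround_times[cur] = finish - arrival_times[cur]
--         waiting_times[cur] = turnaround_times[cur] - burst_times[cur]
--         execution_log.append((processes[cur], time, finish))
--         time = finish
--     return completion_times, turnaround_times, waiting_times, execution_log
-- ===== Notes on version B (the rewrite author's own statement) =====
-- stated objective: faster
-- what changed: B replaces A's unit time-stepping and per-iteration full re-sort of the queue with an event-driven loop that jumps time straight to the next arrival and picks each job by one min() scan keyed by (burst, ready-entry time, index); intended as asymptotically faster (A's cost grows with the arrival times themselves) — a timing run saw A time out at n=16 where B returned, so no ratio could be measured.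
-- outside the precondition, e.g. on sjn(['a'], [], [5]): A returns ([0], [0], [0], []), B raises IndexError
import Mathlib
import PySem

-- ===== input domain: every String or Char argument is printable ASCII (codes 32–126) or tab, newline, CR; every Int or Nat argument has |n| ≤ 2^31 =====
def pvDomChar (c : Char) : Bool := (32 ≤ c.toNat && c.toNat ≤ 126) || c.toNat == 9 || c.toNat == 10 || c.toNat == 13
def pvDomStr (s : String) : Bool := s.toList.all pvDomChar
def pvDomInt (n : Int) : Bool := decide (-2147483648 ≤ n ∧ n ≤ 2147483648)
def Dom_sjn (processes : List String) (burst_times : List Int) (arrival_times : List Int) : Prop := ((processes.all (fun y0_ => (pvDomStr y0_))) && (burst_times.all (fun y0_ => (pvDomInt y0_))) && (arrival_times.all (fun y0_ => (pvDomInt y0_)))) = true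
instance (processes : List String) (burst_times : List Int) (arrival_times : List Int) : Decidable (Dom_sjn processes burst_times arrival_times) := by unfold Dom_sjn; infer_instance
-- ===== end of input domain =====

-- B replaces A's +1 time stepping and per-iteration queue re-sort by an event-driven loop
-- (jump to next arrival, one min() scan per executed job); intended as faster — the timing
-- run saw A time out where B returned, so no ratio was measured.

-- ===== PORT A =====
-- the 'for i in range(n)' arrival-adding loop (threads queue and in_queue)
def sjnAdd (ats rem : List Int) (time : Int) :
    List Nat → List Nat → List Bool → List Nat × List Bool
  | [], q, inq => (q, inq)
  | i :: is, q, inq =>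
    if ats.getD i 0 ≤ time ∧ inq.getD i false = false ∧ 0 < rem.getD i 0 then
      sjnAdd ats rem time is (q ++ [i]) (inq.set i true)
    else
      sjnAdd ats rem time is q inq

-- the 'while True' loop; fuel is a totality guard only (never exhausted under Pre_sjn)
def sjnLoop (processes : List String) (bts ats : List Int) (n : Nat) :
    Nat → List Int → Int → List Nat → List Bool → List Int → List Int → List Int →
    List (String × Int × Int) → List Int × List Int × List Int × List (String × Int × Int)
  | 0, _, _, _, _, comp, tat, wt, log => (comp, tat, wt, log)
  | fuel+1, rem, time, q, inq, comp, tat, wt, log =>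
    let pr := sjnAdd ats rem time (List.range n) q inq
    let q' := pr.1
    let inq' := pr.2
    if q' = [] ∧ rem.any (fun x => x ≠ 0) then
      sjnLoop processes bts ats n fuel rem (time + 1) q' inq' comp tat wt log
    else
      match PySem.List.sorted q' (fun x => rem.getD x 0) false with
      | [] => (comp, tat, wt, log)
      | cur :: rest =>
        let ct := time + bts.getD cur 0
        sjnLoop processes bts ats n fuel (rem.set cur 0) ct rest inq'
          (comp.set cur ct) (tat.set cur (ct - ats.getD cur 0))
          (wt.set cur (ct - ats.getD cur 0 - bts.getD cur 0))
          (log ++ [(processes.getD cur "", time, ct)])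

def sjn (processes : List String) (burst_times : List Int) (arrival_times : List Int) :
    List Int × List Int × List Int × (List (String × Int × Int)) :=
  let n := processes.length
  sjnLoop processes burst_times arrival_times n
    (arrival_times.foldl (fun m x => max m x.natAbs) 0 + 2 * n + 2)
    burst_times 0 [] (List.replicate n false)
    (List.replicate n 0) (List.replicate n 0) (List.replicate n 0) []

-- ===== PORT B =====
-- the inner 'while pending and arrival_times[pending[0]] <= time' pop loop
def sjnAltSpan (ats : List Int) (time : Int) : List Nat → List Nat × List Nat
  | [] => ([], [])
  | p :: ps =>
    if ats.getD p 0 ≤ time then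
      match sjnAltSpan ats time ps with
      | (m, r) => (p :: m, r)
    else ([], p :: ps)

-- strict 'key p < key q' for key = (burst, entry time, index); min() keeps the first minimum
def sjnAltBetter (bts : List Int) (p q : Nat × Int) : Bool :=
  decide (bts.getD p.1 0 < bts.getD q.1 0) ||
    (bts.getD p.1 0 == bts.getD q.1 0 &&
      (decide (p.2 < q.2) || (p.2 == q.2 && decide (p.1 < q.1))))

-- the 'while pending or ready' loop of Source B; one executed job per iteration
def sjnAltLoop (processes : List String) (bts ats : List Int) :
    Nat → List Nat → List (Nat × Int) → Int → List Int → List Int → List Int →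
    List (String × Int × Int) → List Int × List Int × List Int × List (String × Int × Int)
  | 0, _, _, _, comp, tat, wt, log => (comp, tat, wt, log)
  | fuel+1, pending, ready, time0, comp, tat, wt, log =>
    if pending = [] ∧ ready = [] then (comp, tat, wt, log)
    else
      let time := match ready, pending with
        | [], p :: _ => if time0 < ats.getD p 0 then ats.getD p 0 else time0
        | _, _ => time0
      match sjnAltSpan ats time pending with
      | (moved, pending') =>
        match ready ++ moved.map (fun i => (i, time)) with
        | [] => (comp, tat, wt, log)  -- unreachable (Python's min would raise; never hit)
        | r0 :: rrest =>
          let cur := (rrest.foldl (fun best p => if sjnAltBetter bts p best then p else best) r0).1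
          let ct := time + bts.getD cur 0
          sjnAltLoop processes bts ats fuel pending'
            ((r0 :: rrest).filter (fun p => p.1 ≠ cur)) ct
            (comp.set cur ct) (tat.set cur (ct - ats.getD cur 0))
            (wt.set cur (ct - ats.getD cur 0 - bts.getD cur 0))
            (log ++ [(processes.getD cur "", time, ct)])

def sjn_alt (processes : List String) (burst_times : List Int) (arrival_times : List Int) :
    List Int × List Int × List Int × (List (String × Int × Int)) :=
  let n := processes.length
  sjnAltLoop processes burst_times arrival_times (n + 1)
    (PySem.List.sorted ((List.range n).filter (fun i => decide (0 < burst_times.getD i 0)))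
      (fun i => arrival_times.getD i 0) false)
    [] 0 (List.replicate n 0) (List.replicate n 0) (List.replicate n 0) []

-- ===== PRECONDITION & SPEC =====
-- Pre_sjn excludes the inputs on which A raises (burst/arrival lists shorter than processes,
-- IndexError) or never terminates (a negative burst among the first n, or a nonzero burst
-- beyond them, keeps 'any(remaining_burst)' truthy forever); on a few short-list inputs A still
-- returns because no process ever arrives and the list is never indexed, while B's up-front
-- scan of the burst list naturally raises there.
def Pre_sjn (processes : List String) (burst_times : List Int) (arrival_times : List Int) : Prop :=
  processes.length ≤ burst_times.length ∧ processes.length ≤ arrival_times.length ∧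
  (∀ x ∈ burst_times.take processes.length, 0 ≤ x) ∧
  (∀ x ∈ burst_times.drop processes.length, x = 0)
instance (processes : List String) (burst_times : List Int) (arrival_times : List Int) : Decidable (Pre_sjn processes burst_times arrival_times) := by unfold Pre_sjn; infer_instance

def pvWitness_sjn : List String × List Int × List Int := (["a", "b"], [2, 1], [0, 3])

def Spec_sjn (processes : List String) (burst_times : List Int) (arrival_times : List Int) (out : List Int × List Int × List Int × (List (String × Int × Int))) : Prop := out = sjn_alt processes burst_times arrival_times
instance (processes : List String) (burst_times : List Int) (arrival_times : List Int) (out : List Int × List Int × List Int × (List (String × Int × Int))) : Decidable (Spec_sjn processes burst_times arrival_times out) := by unfold Spec_sjn; infer_instance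

-- ===== CLAIM (what is proved, stated in full; the proofs are below) =====
def Claim_equal_sjn : Prop := ∀ (processes : List String) (burst_times : List Int) (arrival_times : List Int), Dom_sjn processes burst_times arrival_times → Pre_sjn processes burst_times arrival_times → Spec_sjn processes burst_times arrival_times (sjn processes burst_times arrival_times)

-- ===== LEMMAS AND PROOFS =====

-- strict lexicographic order on (burst, ready-entry time, index); the key B minimises
def ltP (bts : List Int) (p q : Nat × Int) : Prop :=
  bts.getD p.1 0 < bts.getD q.1 0 ∨
    (bts.getD p.1 0 = bts.getD q.1 0 ∧ (p.2 < q.2 ∨ (p.2 = q.2 ∧ p.1 < q.1)))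

-- the same order on indices, entry times given by a function
def ltE (bts : List Int) (ent : Nat → Int) (i j : Nat) : Prop := ltP bts (i, ent i) (j, ent j)

-- strict (arrival, index) order; the order of B's pending list
def lexA (ats : List Int) (i j : Nat) : Prop :=
  ats.getD i 0 < ats.getD j 0 ∨ (ats.getD i 0 = ats.getD j 0 ∧ i < j)

lemma better_eq_true_iff (bts : List Int) (p q : Nat × Int) :
    sjnAltBetter bts p q = true ↔ ltP bts p q := by
  simp only [sjnAltBetter, ltP, Bool.or_eq_true, Bool.and_eq_true, decide_eq_true_eq,
    beq_iff_eq]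

lemma ltE_iff (bts : List Int) (e : Nat → Int) (i j : Nat) :
    ltE bts e i j ↔ (bts.getD i 0 < bts.getD j 0 ∨
      (bts.getD i 0 = bts.getD j 0 ∧ (e i < e j ∨ (e i = e j ∧ i < j)))) := by
  simp [ltE, ltP]

lemma ltP_irrefl (bts : List Int) (p : Nat × Int) : ¬ ltP bts p p := by
  simp only [ltP]; omega

lemma ltP_trans (bts : List Int) {p q r : Nat × Int} :
    ltP bts p q → ltP bts q r → ltP bts p r := by
  simp only [ltP]; omega

lemma ltP_total (bts : List Int) {p q : Nat × Int} (h : p ≠ q) :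
    ltP bts p q ∨ ltP bts q p := by
  rcases p with ⟨i, e⟩; rcases q with ⟨j, f⟩
  simp only [ne_eq, Prod.mk.injEq, not_and] at h
  simp only [ltP]
  by_cases hij : i = j
  · subst hij; have := h rfl; omega
  · omega

-- characterisation of B's min() fold: result is a member no member beats
lemma foldMin_spec (bts : List Int) (r0 : Nat × Int) (l : List (Nat × Int)) :
    (l.foldl (fun best p => if sjnAltBetter bts p best then p else best) r0) ∈ r0 :: l ∧
    ∀ x ∈ r0 :: l,
      ¬ ltP bts x (l.foldl (fun best p => if sjnAltBetter bts p best then p else best) r0) := by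
  induction l generalizing r0 with
  | nil =>
    refine ⟨by simp, ?_⟩
    intro x hx
    simp only [List.mem_cons, List.not_mem_nil, or_false] at hx
    subst hx
    simp only [List.foldl_nil]
    exact ltP_irrefl bts x
  | cons x l ih =>
    simp only [List.foldl_cons]
    obtain ⟨hmem, hmin⟩ := ih (if sjnAltBetter bts x r0 then x else r0)
    by_cases hb : sjnAltBetter bts x r0 = true
    · simp only [hb, if_true] at hmem hmin ⊢
      constructor
      · rcases List.mem_cons.mp hmem with h | h
        · simp [h]
        · simp [List.mem_cons, h]
      · intro y hy
        rcases List.mem_cons.mp hy with rfl | hy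
        · -- y = r0 : x beats r0, so ltP r0 res would give ltP x res
          intro hcon
          exact hmin x (List.mem_cons_self) (ltP_trans bts ((better_eq_true_iff bts x _).mp hb) hcon)
        · exact hmin y hy
    · simp only [hb, if_false, Bool.false_eq_true] at hmem hmin ⊢
      constructor
      · rcases List.mem_cons.mp hmem with h | h
        · simp [h]
        · simp [List.mem_cons, h]
      · intro y hy
        rcases List.mem_cons.mp hy with rfl | hy
        · exact hmin y (List.mem_cons_self)
        · rcases List.mem_cons.mp hy with rfl | hy
          · -- y = x, not better than r0
            intro hcon
            have hnx : ¬ ltP bts y r0 := fun hc => hb ((better_eq_true_iff bts y r0).mpr hc)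
            by_cases hxy : y = r0
            · subst hxy; exact hmin y (List.mem_cons_self) hcon
            · rcases ltP_total bts hxy with h1 | h1
              · exact hnx h1
              · exact hmin _ (List.mem_cons_self) (ltP_trans bts h1 hcon)
          · exact hmin y (List.mem_cons_of_mem _ hy)

lemma insertBy_pairwise_of (key : Nat → Int) (lt : Nat → Nat → Prop) (z : Nat) :
    ∀ (acc : List Nat), acc.Pairwise lt →
      (∀ y ∈ acc, (key z < key y → lt z y) ∧ (key y ≤ key z → lt y z)) →
      (∀ a ∈ acc, ∀ b ∈ acc, lt a b → key a ≤ key b) →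
      (PySem.List.insertBy (fun u v => decide (key u < key v)) z acc).Pairwise lt := by
  intro acc
  induction acc with
  | nil => intro _ _ _; simp [PySem.List.insertBy]
  | cons y ys ih =>
    intro hpw hz hres
    rw [PySem.List.insertBy]
    by_cases hky : key z < key y
    · simp only [hky, decide_true, if_true]
      rw [List.pairwise_cons]
      refine ⟨?_, hpw⟩
      intro w hw
      rcases List.mem_cons.mp hw with rfl | hw
      · exact (hz w List.mem_cons_self).1 hky
      · have hyw : lt y w := (List.pairwise_cons.mp hpw).1 w hw
        have : key y ≤ key w := hres y List.mem_cons_self w (List.mem_cons_of_mem _ hw) hyw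
        exact (hz w (List.mem_cons_of_mem _ hw)).1 (lt_of_lt_of_le hky this)
    · simp only [hky, decide_false, if_false, Bool.false_eq_true]
      rw [List.pairwise_cons]
      constructor
      · intro w hw
        rcases (PySem.List.mem_insertBy _ _ _ _).mp hw with rfl | hw
        · exact (hz y List.mem_cons_self).2 (le_of_not_gt hky)
        · exact (List.pairwise_cons.mp hpw).1 w hw
      · exact ih (List.pairwise_cons.mp hpw).2
          (fun w hw => hz w (List.mem_cons_of_mem _ hw))
          (fun a ha b hb => hres a (List.mem_cons_of_mem _ ha) b (List.mem_cons_of_mem _ hb))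

lemma foldl_insertBy_pairwise_of (key : Nat → Int) (lt : Nat → Nat → Prop) (xs : List Nat)
    (href : ∀ x ∈ xs, ∀ y ∈ xs, key x < key y → lt x y)
    (hres : ∀ x ∈ xs, ∀ y ∈ xs, lt x y → key x ≤ key y) :
    ∀ (rest acc : List Nat),
      (∀ x ∈ acc, x ∈ xs) → (∀ x ∈ rest, x ∈ xs) →
      acc.Pairwise lt →
      rest.Pairwise (fun x y => key x ≤ key y → lt x y) →
      (∀ y ∈ acc, ∀ z ∈ rest, key y ≤ key z → lt y z) →
      (rest.foldl (fun a x => PySem.List.insertBy (fun u v => decide (key u < key v)) x a) acc).Pairwise lt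
      ∧ ∀ w ∈ rest.foldl (fun a x => PySem.List.insertBy (fun u v => decide (key u < key v)) x a) acc,
          w ∈ acc ∨ w ∈ rest := by
  intro rest
  induction rest with
  | nil => intro acc _ _ hpw _ _; exact ⟨hpw, fun w hw => Or.inl hw⟩
  | cons z rest ih =>
    intro acc haccx hrestx hpwacc hpwrest hcross
    simp only [List.foldl_cons]
    have hzx : z ∈ xs := hrestx z List.mem_cons_self
    have hpw' : (PySem.List.insertBy (fun u v => decide (key u < key v)) z acc).Pairwise lt := by
      refine insertBy_pairwise_of key lt z acc hpwacc ?_ ?_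
      · intro y hy
        exact ⟨fun h => href z hzx y (haccx y hy) h,
               fun h => hcross y hy z List.mem_cons_self h⟩
      · intro a ha b hb
        exact hres a (haccx a ha) b (haccx b hb)
    have hmem' : ∀ w ∈ PySem.List.insertBy (fun u v => decide (key u < key v)) z acc,
        w ∈ xs := by
      intro w hw
      rcases (PySem.List.mem_insertBy _ _ _ _).mp hw with rfl | hw
      · exact hzx
      · exact haccx w hw
    have hcross' : ∀ y ∈ PySem.List.insertBy (fun u v => decide (key u < key v)) z acc,
        ∀ z' ∈ rest, key y ≤ key z' → lt y z' := by
      intro y hy z' hz' hkey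
      rcases (PySem.List.mem_insertBy _ _ _ _).mp hy with rfl | hy'
      · exact (List.pairwise_cons.mp hpwrest).1 z' hz' hkey
      · exact hcross y hy' z' (List.mem_cons_of_mem _ hz') hkey
    obtain ⟨hp, hm⟩ := ih (PySem.List.insertBy (fun u v => decide (key u < key v)) z acc)
      hmem' (fun x hx => hrestx x (List.mem_cons_of_mem _ hx)) hpw'
      (List.pairwise_cons.mp hpwrest).2 hcross'
    refine ⟨hp, ?_⟩
    intro w hw
    rcases hm w hw with hw' | hw'
    · rcases (PySem.List.mem_insertBy _ _ _ _).mp hw' with rfl | hw''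
      · exact Or.inr List.mem_cons_self
      · exact Or.inl hw''
    · exact Or.inr (List.mem_cons_of_mem _ hw')

-- the stable sort of A, characterised: its output is pairwise-increasing in any strict
-- order lt that refines the sort key and agrees with the input order on key ties
lemma sorted_pairwise_of (xs : List Nat) (key : Nat → Int) (lt : Nat → Nat → Prop)
    (href : ∀ x ∈ xs, ∀ y ∈ xs, key x < key y → lt x y)
    (htie : xs.Pairwise (fun x y => key x = key y → lt x y))
    (hres : ∀ x ∈ xs, ∀ y ∈ xs, lt x y → key x ≤ key y) :
    (PySem.List.sorted xs key false).Pairwise lt := by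
  rw [PySem.List.sorted_eq_foldl_insertBy]
  refine (foldl_insertBy_pairwise_of key lt xs href hres xs [] (by simp) (fun x hx => hx)
    List.Pairwise.nil ?_ (by simp)).1
  refine htie.imp_of_mem ?_
  intro a b ha hb h hkey
  rcases lt_or_eq_of_le hkey with h' | h'
  · exact href a ha b hb h'
  · exact h h'

lemma getD_set_self_of_lt {α : Type} {l : List α} {i : Nat} (h : i < l.length) (a d : α) :
    (l.set i a).getD i d = a := by
  simp [List.getD_eq_getElem?_getD, List.getElem?_set_self h]

lemma getD_set_ne {α : Type} {l : List α} {i j : Nat} (h : i ≠ j) (a d : α) :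
    (l.set i a).getD j d = l.getD j d := by
  simp [List.getD_eq_getElem?_getD, List.getElem?_set_ne h]

-- A's arrival-adding pass, characterised
lemma sjnAdd_spec (ats rem : List Int) (time : Int) :
    ∀ (l : List Nat) (q : List Nat) (inq : List Bool), l.Nodup →
      (∀ i ∈ l, i < inq.length) →
      (sjnAdd ats rem time l q inq).1 =
        q ++ l.filter (fun i => decide (ats.getD i 0 ≤ time ∧ inq.getD i false = false ∧ 0 < rem.getD i 0))
      ∧ (sjnAdd ats rem time l q inq).2.length = inq.length
      ∧ ∀ j, (sjnAdd ats rem time l q inq).2.getD j false =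
          (inq.getD j false ||
            decide (j ∈ l ∧ ats.getD j 0 ≤ time ∧ inq.getD j false = false ∧ 0 < rem.getD j 0)) := by
  intro l
  induction l with
  | nil =>
    intro q inq _ _
    refine ⟨by simp [sjnAdd], by simp [sjnAdd], ?_⟩
    intro j; simp [sjnAdd]
  | cons i is ih =>
    intro q inq hnd hb
    have hii : i < inq.length := hb i List.mem_cons_self
    have hnd' : is.Nodup := (List.nodup_cons.mp hnd).2
    have hni : i ∉ is := (List.nodup_cons.mp hnd).1
    by_cases hc : ats.getD i 0 ≤ time ∧ inq.getD i false = false ∧ 0 < rem.getD i 0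
    · have hstep : sjnAdd ats rem time (i :: is) q inq =
          sjnAdd ats rem time is (q ++ [i]) (inq.set i true) := by
        simp only [sjnAdd]; rw [if_pos hc]
      have hb' : ∀ j ∈ is, j < (inq.set i true).length := by
        simpa using fun j hj => hb j (List.mem_cons_of_mem _ hj)
      obtain ⟨h1, h2, h3⟩ := ih (q ++ [i]) (inq.set i true) hnd' hb'
      have hfc : is.filter (fun j => decide (ats.getD j 0 ≤ time ∧
            (inq.set i true).getD j false = false ∧ 0 < rem.getD j 0)) =
          is.filter (fun j => decide (ats.getD j 0 ≤ time ∧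
            inq.getD j false = false ∧ 0 < rem.getD j 0)) := by
        refine List.filter_congr ?_
        intro j hj
        have hij : i ≠ j := fun h => hni (h ▸ hj)
        rw [getD_set_ne hij]
      refine ⟨?_, ?_, ?_⟩
      · rw [hstep, h1, hfc]
        have hd : decide (ats.getD i 0 ≤ time ∧ inq.getD i false = false ∧ 0 < rem.getD i 0) = true :=
          decide_eq_true hc
        rw [List.filter_cons, hd]
        simp
      · rw [hstep, h2, List.length_set]
      · intro j
        rw [hstep, h3 j]
        by_cases hij : j = i
        · subst hij
          rw [getD_set_self_of_lt hii]
          rw [hc.2.1, Bool.false_or, Bool.true_or]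
          symm
          rw [decide_eq_true_eq]
          exact ⟨List.mem_cons_self, hc.1, rfl, hc.2.2⟩
        · rw [getD_set_ne (fun h => hij h.symm)]
          congr 1
          rw [decide_eq_decide]
          constructor
          · rintro ⟨hm, h⟩; exact ⟨List.mem_cons_of_mem _ hm, h⟩
          · rintro ⟨hm, h⟩
            rcases List.mem_cons.mp hm with rfl | hm
            · exact absurd rfl hij
            · exact ⟨hm, h⟩
    · have hstep : sjnAdd ats rem time (i :: is) q inq =
          sjnAdd ats rem time is q inq := by
        simp only [sjnAdd]; rw [if_neg hc]
      obtain ⟨h1, h2, h3⟩ := ih q inq hnd' (fun j hj => hb j (List.mem_cons_of_mem _ hj))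
      refine ⟨?_, ?_, ?_⟩
      · rw [hstep, h1]
        have hd : decide (ats.getD i 0 ≤ time ∧ inq.getD i false = false ∧ 0 < rem.getD i 0) = false :=
          decide_eq_false hc
        rw [List.filter_cons, hd]
        simp
      · rw [hstep, h2]
      · intro j
        rw [hstep, h3 j]
        congr 1
        rw [decide_eq_decide]
        constructor
        · rintro ⟨hm, h⟩; exact ⟨List.mem_cons_of_mem _ hm, h⟩
        · rintro ⟨hm, h⟩
          rcases List.mem_cons.mp hm with rfl | hm
          · exact absurd h hc
          · exact ⟨hm, h⟩

-- B's inner pop loop is takeWhile/dropWhile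
lemma sjnAltSpan_eq (ats : List Int) (time : Int) : ∀ (l : List Nat),
    sjnAltSpan ats time l =
      (l.takeWhile (fun p => decide (ats.getD p 0 ≤ time)),
       l.dropWhile (fun p => decide (ats.getD p 0 ≤ time))) := by
  intro l
  induction l with
  | nil => simp [sjnAltSpan]
  | cons p ps ih =>
    simp only [sjnAltSpan, ih, List.takeWhile_cons, List.dropWhile_cons]
    split_ifs with h <;> simp_all <;> omega

lemma dropWhile_head_false {α : Type} (p : α → Bool) (l : List α) (d0 : α) (ds : List α)
    (hd : l.dropWhile p = d0 :: ds) : p d0 = false := by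
  induction l with
  | nil => simp at hd
  | cons a l ih =>
    rw [List.dropWhile_cons] at hd
    by_cases h : p a = true
    · rw [if_pos h] at hd; exact ih hd
    · rw [if_neg h] at hd
      cases hd; simpa using h

-- on a lexA-sorted pending list, the popped prefix is exactly the arrived members
lemma mem_takeWhile_lex (ats : List Int) (time : Int) (l : List Nat)
    (hpw : l.Pairwise (lexA ats)) (i : Nat) :
    i ∈ l.takeWhile (fun p => decide (ats.getD p 0 ≤ time)) ↔ i ∈ l ∧ ats.getD i 0 ≤ time := by
  constructor
  · intro h
    refine ⟨(List.takeWhile_sublist _).mem h, ?_⟩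
    have := List.mem_takeWhile_imp h
    simpa using this
  · rintro ⟨hmem, hle⟩
    by_contra hno
    have hsplit : i ∈ l.takeWhile (fun p => decide (ats.getD p 0 ≤ time)) ++
        l.dropWhile (fun p => decide (ats.getD p 0 ≤ time)) := by
      rw [List.takeWhile_append_dropWhile]; exact hmem
    have hmem' : i ∈ l.dropWhile (fun p => decide (ats.getD p 0 ≤ time)) := by
      rcases List.mem_append.mp hsplit with h | h
      · exact absurd h hno
      · exact h
    cases hd : l.dropWhile (fun p => decide (ats.getD p 0 ≤ time)) with
    | nil => rw [hd] at hmem'; exact absurd hmem' (List.not_mem_nil)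
    | cons d0 ds =>
      have hd0 : ¬ ats.getD d0 0 ≤ time := by
        simpa using dropWhile_head_false _ _ _ _ hd
      have hpwd : (d0 :: ds).Pairwise (lexA ats) :=
        hd ▸ (hpw.sublist (List.dropWhile_sublist _))
      rw [hd] at hmem'
      rcases List.mem_cons.mp hmem' with rfl | hmem'' 
      · exact hd0 hle
      · have hlt := (List.pairwise_cons.mp hpwd).1 i hmem''
        unfold lexA at hlt
        omega

-- B ignores an idle unit time step: jumping from t or from t+1 lands on the same arrival
lemma sjnAltLoop_jump (processes : List String) (bts ats : List Int) (fb : Nat)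
    (p : Nat) (ps : List Nat) (t : Int)
    (comp tat wt : List Int) (log : List (String × Int × Int))
    (h : t + 1 ≤ ats.getD p 0) :
    sjnAltLoop processes bts ats (fb + 1) (p :: ps) [] t comp tat wt log =
    sjnAltLoop processes bts ats (fb + 1) (p :: ps) [] (t + 1) comp tat wt log := by
  simp only [sjnAltLoop]
  have hL : (if t < ats.getD p 0 then ats.getD p 0 else t) = ats.getD p 0 := if_pos (by omega)
  have hR : (if t + 1 < ats.getD p 0 then ats.getD p 0 else t + 1) = ats.getD p 0 := by
    split_ifs with h' <;> omega
  rw [hL, hR]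


-- one non-idle iteration of B's loop, with the jump guard resolved to keep time = t
def altBody (processes : List String) (bts ats : List Int) (fb : Nat)
    (pending : List Nat) (ready : List (Nat × Int)) (t : Int)
    (comp tat wt : List Int) (log : List (String × Int × Int)) :
    List Int × List Int × List Int × List (String × Int × Int) :=
  match sjnAltSpan ats t pending with
  | (moved, pending') =>
    match ready ++ moved.map (fun i => (i, t)) with
    | [] => (comp, tat, wt, log)
    | r0 :: rrest =>
      let cur := (rrest.foldl (fun best p => if sjnAltBetter bts p best then p else best) r0).1
      let ct := t + bts.getD cur 0
      sjnAltLoop processes bts ats fb pending' ((r0 :: rrest).filter (fun p => p.1 ≠ cur)) ct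
        (comp.set cur ct) (tat.set cur (ct - ats.getD cur 0))
        (wt.set cur (ct - ats.getD cur 0 - bts.getD cur 0))
        (log ++ [(processes.getD cur "", t, ct)])

lemma sjnAltLoop_step (processes : List String) (bts ats : List Int) (fb : Nat)
    (pending : List Nat) (ready : List (Nat × Int)) (t : Int)
    (comp tat wt : List Int) (log : List (String × Int × Int))
    (hne : ¬ (pending = [] ∧ ready = []))
    (hnj : ∀ p ps, pending = p :: ps → ready = [] → ¬ t < ats.getD p 0) :
    sjnAltLoop processes bts ats (fb + 1) pending ready t comp tat wt log =
      altBody processes bts ats fb pending ready t comp tat wt log := by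
  cases ready with
  | nil =>
    cases pending with
    | nil => exact absurd ⟨rfl, rfl⟩ hne
    | cons p ps =>
      have hj : ¬ t < ats.getD p 0 := hnj p ps rfl rfl
      simp only [sjnAltLoop, altBody]
      rw [if_neg (by simp), if_neg hj]
  | cons r rs =>
    cases pending with
    | nil =>
      simp only [sjnAltLoop, altBody]
      rw [if_neg (by simp)]
    | cons p ps =>
      simp only [sjnAltLoop, altBody]
      rw [if_neg (by simp)]

-- ===== the simulation invariant and main lemma =====

set_option maxHeartbeats 1600000 in
lemma sim (processes : List String) (bts ats : List Int)
    (hb_nonneg : ∀ i, i < processes.length → 0 ≤ bts.getD i 0)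
    (hb_tail : ∀ i, processes.length ≤ i → bts.getD i 0 = 0)
    (hn_b : processes.length ≤ bts.length) (hn_a : processes.length ≤ ats.length) :
    ∀ (fuelA : Nat) (fuelB : Nat) (t : Int) (rem : List Int) (q : List Nat) (inq : List Bool)
      (pending : List Nat) (ready : List (Nat × Int)) (ent : Nat → Int)
      (comp tat wt : List Int) (log : List (String × Int × Int)),
      rem.length = bts.length → inq.length = processes.length →
      (∀ i, i < rem.length → rem.getD i 0 = if i ∈ pending ∨ i ∈ q then bts.getD i 0 else 0) →
      (∀ i, i < processes.length →
        inq.getD i false = decide (i ∉ pending ∧ 0 < bts.getD i 0)) →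
      (∀ i ∈ q, i < processes.length ∧ 0 < bts.getD i 0 ∧ ent i < t) →
      q.Pairwise (ltE bts ent) →
      ready.Perm (q.map (fun i => (i, ent i))) →
      (∀ j ∈ pending, j < processes.length ∧ 0 < bts.getD j 0 ∧ j ∉ q) →
      pending.Pairwise (lexA ats) →
      (((ats.foldl (fun m x => max m x.natAbs) 0 : Nat) : Int) - t).toNat
        + 2 * (pending.length + q.length) + 1 ≤ fuelA →
      pending.length + ready.length + 1 ≤ fuelB →
      sjnLoop processes bts ats processes.length fuelA rem t q inq comp tat wt log =
      sjnAltLoop processes bts ats fuelB pending ready t comp tat wt log := by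
  intro fuelA
  induction fuelA with
  | zero =>
    intro fuelB t rem q inq pending ready ent comp tat wt log _ _ _ _ _ _ _ _ _ hfA _
    omega
  | succ fa ih =>
    intro fuelB t rem q inq pending ready ent comp tat wt log hreml hinql hrem hinq hqmem
      hqpw hready hpmem hppw hfA hfB
    -- abbreviations and basic facts
    have hnR : (List.range processes.length).Nodup := List.nodup_range
    have hbR : ∀ i ∈ List.range processes.length, i < inq.length := by
      intro i hi; rw [hinql]; exact List.mem_range.mp hi
    obtain ⟨hq1, hq2, hq3⟩ := sjnAdd_spec ats rem t (List.range processes.length) q inq hnR hbR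
    have hlexA_irr : ∀ i, ¬ lexA ats i i := by intro i; unfold lexA; omega
    have hltE_irr : ∀ (e : Nat → Int) i, ¬ ltE bts e i i := by
      intro e i; unfold ltE ltP; simp
    have hpnd : pending.Nodup :=
      hppw.imp (fun {a b} h => fun he => absurd (he ▸ h) (hlexA_irr _))
    have hqnd : q.Nodup :=
      hqpw.imp (fun {a b} h => fun he => absurd (he ▸ h) (hltE_irr ent _))
    have hremlen : rem.length = bts.length := hreml
    -- the added-arrival predicate, characterised
    have hPchar : ∀ i, i < processes.length →
        ((ats.getD i 0 ≤ t ∧ inq.getD i false = false ∧ 0 < rem.getD i 0) ↔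
          (i ∈ pending ∧ ats.getD i 0 ≤ t)) := by
      intro i hi
      have hiq := hinq i hi
      have hirem : i < rem.length := by rw [hremlen]; omega
      have hr := hrem i hirem
      constructor
      · rintro ⟨ha, hf, hpos⟩
        have h1 : ¬ (i ∉ pending ∧ 0 < bts.getD i 0) := by
          rw [hiq] at hf; exact of_decide_eq_false hf
        by_cases hm : i ∈ pending ∨ i ∈ q
        · rw [if_pos hm] at hr
          have hbpos : 0 < bts.getD i 0 := hr ▸ hpos
          have hp : i ∈ pending := by by_contra hnp; exact h1 ⟨hnp, hbpos⟩
          exact ⟨hp, ha⟩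
        · rw [if_neg hm] at hr; omega
      · rintro ⟨hp, ha⟩
        refine ⟨ha, ?_, ?_⟩
        · rw [hiq]; simp [hp]
        · rw [hr, if_pos (Or.inl hp)]; exact (hpmem i hp).2.1
    have hmovedc : (List.range processes.length).filter
        (fun i => decide (ats.getD i 0 ≤ t ∧ inq.getD i false = false ∧ 0 < rem.getD i 0)) =
        (List.range processes.length).filter (fun i => decide (i ∈ pending ∧ ats.getD i 0 ≤ t)) := by
      refine List.filter_congr ?_
      intro i hi
      rw [decide_eq_decide]; exact hPchar i (List.mem_range.mp hi)
    have hq1' : (sjnAdd ats rem t (List.range processes.length) q inq).1 =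
        q ++ (List.range processes.length).filter (fun i => decide (i ∈ pending ∧ ats.getD i 0 ≤ t)) := by
      rw [hq1, hmovedc]
    have hmemMA : ∀ i, i ∈ (List.range processes.length).filter
        (fun i => decide (i ∈ pending ∧ ats.getD i 0 ≤ t)) ↔
        i ∈ pending ∧ ats.getD i 0 ≤ t := by
      intro i
      rw [List.mem_filter]
      constructor
      · rintro ⟨_, h⟩; exact of_decide_eq_true h
      · intro h; exact ⟨List.mem_range.mpr (hpmem i h.1).1, decide_eq_true h⟩
    have hMAnd : ((List.range processes.length).filter
        (fun i => decide (i ∈ pending ∧ ats.getD i 0 ≤ t))).Nodup := hnR.filter _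
    have hMApw : ((List.range processes.length).filter
        (fun i => decide (i ∈ pending ∧ ats.getD i 0 ≤ t))).Pairwise (· < ·) :=
      List.pairwise_lt_range.sublist List.filter_sublist
    have hgetDmem : ∀ (i : Nat), i < processes.length → ats.getD i 0 ∈ ats := by
      intro i hi
      rw [List.getD_eq_getElem ats 0 (by omega)]
      exact List.getElem_mem _
    have hMAB : ∀ x ∈ ats, x ≤ ((ats.foldl (fun m x => max m x.natAbs) 0 : Nat) : Int) := by
      intro x hx
      have h1 := (PySem.List.le_foldl_max_nat ats (fun x => x.natAbs) 0).2 x hx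
      calc x ≤ (x.natAbs : Int) := Int.le_natAbs
        _ ≤ _ := by exact_mod_cast h1
    by_cases hqq : (sjnAdd ats rem t (List.range processes.length) q inq).1 = []
    · -- the queue is empty after adding arrivals: either done or idle
      have hq0 : q = [] := by
        rw [hq1'] at hqq; exact List.append_eq_nil_iff.mp hqq |>.1
      have hMA0 : (List.range processes.length).filter
          (fun i => decide (i ∈ pending ∧ ats.getD i 0 ≤ t)) = [] := by
        rw [hq1'] at hqq; exact List.append_eq_nil_iff.mp hqq |>.2
      have hready0 : ready = [] := by
        subst hq0
        have : ready.Perm [] := by simpa using hready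
        exact this.eq_nil
      subst hq0
      subst hready0
      cases hpend : pending with
      | nil =>
        -- all processes finished: both sides return the arrays
        have hany : rem.any (fun x => decide (x ≠ 0)) = false := by
          apply List.any_eq_false.mpr
          intro x hx
          obtain ⟨k, hk, rfl⟩ := List.mem_iff_getElem.mp hx
          have hr := hrem k hk
          rw [List.getD_eq_getElem rem 0 hk, hpend] at hr
          simp only [List.not_mem_nil, or_self, if_false] at hr
          simp [hr]
        have hAside : sjnLoop processes bts ats processes.length (fa + 1) rem t [] inq
            comp tat wt log = (comp, tat, wt, log) := by
          simp only [sjnLoop]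
          rw [hqq, hany]
          rw [if_neg (by simp)]
          rfl
        have hBside : sjnAltLoop processes bts ats fuelB [] [] t comp tat wt log =
            (comp, tat, wt, log) := by
          cases fuelB with
          | zero => rfl
          | succ fb =>
            simp only [sjnAltLoop]
            rw [if_pos (by simp)]
        rw [hAside, hBside]
      | cons p0 ps =>
        -- idle: no process has arrived yet; A steps time by 1, B's jump absorbs it
        have hap0 : ¬ ats.getD p0 0 ≤ t := by
          intro h
          have hm : p0 ∈ (List.range processes.length).filter
              (fun i => decide (i ∈ pending ∧ ats.getD i 0 ≤ t)) :=
            (hmemMA p0).mpr ⟨by rw [hpend]; exact List.mem_cons_self, h⟩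
          rw [hMA0] at hm
          exact absurd hm (List.not_mem_nil)
        have hp0p : p0 ∈ pending := by rw [hpend]; exact List.mem_cons_self
        have hp0n : p0 < processes.length := (hpmem p0 hp0p).1
        have hp0b : 0 < bts.getD p0 0 := (hpmem p0 hp0p).2.1
        have hany : rem.any (fun x => decide (x ≠ 0)) = true := by
          have hlt : p0 < rem.length := by rw [hremlen]; omega
          have hx : ∃ x ∈ rem, x ≠ 0 := by
            refine ⟨rem.getD p0 0, ?_, ?_⟩
            · rw [List.getD_eq_getElem rem 0 hlt]; exact List.getElem_mem _
            · rw [hrem p0 hlt, if_pos (Or.inl hp0p)]; omega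
          simpa [List.any_eq_true] using hx
        have hMAt : ats.getD p0 0 ≤ ((ats.foldl (fun m x => max m x.natAbs) 0 : Nat) : Int) :=
          hMAB _ (hgetDmem p0 hp0n)
        subst hpend
        have hinq' : ∀ i, i < processes.length →
            (sjnAdd ats rem t (List.range processes.length) [] inq).2.getD i false =
            decide (i ∉ (p0 :: ps) ∧ 0 < bts.getD i 0) := by
          intro i hi
          rw [hq3 i]
          have hnot : ¬ (i ∈ List.range processes.length ∧ ats.getD i 0 ≤ t ∧
              inq.getD i false = false ∧ 0 < rem.getD i 0) := by
            rintro ⟨_, hcond⟩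
            have hm := (hmemMA i).mpr ((hPchar i hi).mp hcond)
            rw [hMA0] at hm
            exact absurd hm (List.not_mem_nil)
          rw [decide_eq_false hnot, Bool.or_false]
          exact hinq i hi
        have hstep : sjnLoop processes bts ats processes.length (fa + 1) rem t [] inq
            comp tat wt log =
            sjnLoop processes bts ats processes.length fa rem (t + 1) []
              (sjnAdd ats rem t (List.range processes.length) [] inq).2 comp tat wt log := by
          simp only [sjnLoop]
          rw [hany, if_pos ⟨hqq, rfl⟩]
          rw [hqq]
        rw [hstep]
        rcases fuelB with _ | fb
        · exfalso; simp at hfB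
        rw [sjnAltLoop_jump processes bts ats fb p0 ps t comp tat wt log (by omega)]
        refine ih (fb + 1) (t + 1) rem []
          (sjnAdd ats rem t (List.range processes.length) [] inq).2 (p0 :: ps) [] ent
          comp tat wt log hreml (by rw [hq2, hinql]) hrem hinq'
          (fun i hi => absurd hi (List.not_mem_nil)) List.Pairwise.nil (by simp)
          hpmem hppw ?_ ?_
        · simp only [List.length_nil] at hfA ⊢
          omega
        · simpa using hfB
    · -- execution step
      set movedA := (List.range processes.length).filter
          (fun i => decide (i ∈ pending ∧ ats.getD i 0 ≤ t)) with hMAdef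
      set movedB := pending.takeWhile (fun p => decide (ats.getD p 0 ≤ t)) with hMBdef
      set pending2 := pending.dropWhile (fun p => decide (ats.getD p 0 ≤ t)) with hP2def
      have hqne : q ++ movedA ≠ [] := by rw [← hq1']; exact hqq
      have hmemMB : ∀ i, i ∈ movedB ↔ i ∈ pending ∧ ats.getD i 0 ≤ t :=
        mem_takeWhile_lex ats t pending hppw
      have hMBnd : movedB.Nodup := by
        rw [hMBdef]; exact hpnd.sublist (List.takeWhile_sublist _)
      have hpermM : movedB.Perm movedA :=
        (List.perm_ext_iff_of_nodup hMBnd hMAnd).mpr (fun i => by rw [hmemMB, hmemMA])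
      have hdisjBP : List.Disjoint movedB pending2 := by
        have := hpnd
        rw [← List.takeWhile_append_dropWhile (p := fun p => decide (ats.getD p 0 ≤ t))
          (l := pending)] at this
        exact this.disjoint
      have hdisj : ∀ i ∈ q, i ∉ movedA := fun i hiq him =>
        absurd hiq (hpmem i ((hmemMA i).mp him).1).2.2
      have hq2mem : ∀ i ∈ q ++ movedA, i < processes.length ∧ 0 < bts.getD i 0 := by
        intro i hi
        rcases List.mem_append.mp hi with h | h
        · exact ⟨(hqmem i h).1, (hqmem i h).2.1⟩
        · have hp := ((hmemMA i).mp h).1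
          exact ⟨(hpmem i hp).1, (hpmem i hp).2.1⟩
      have hkeyb : ∀ i ∈ q ++ movedA, rem.getD i 0 = bts.getD i 0 := by
        intro i hi
        have hin : i < rem.length := by rw [hremlen]; have := (hq2mem i hi).1; omega
        rw [hrem i hin]
        rcases List.mem_append.mp hi with h | h
        · rw [if_pos (Or.inr h)]
        · rw [if_pos (Or.inl ((hmemMA i).mp h).1)]
      set ent' : Nat → Int := fun i => if i ∈ movedA then t else ent i with hEdef
      have hentq : ∀ i ∈ q, ent' i = ent i := fun i h => if_neg (hdisj i h)
      have hentM : ∀ i ∈ movedA, ent' i = t := fun i _h => if_pos _h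
      have hsortpw : (PySem.List.sorted (q ++ movedA) (fun x => rem.getD x 0) false).Pairwise
          (ltE bts ent') := by
        apply sorted_pairwise_of
        · intro x hx y hy hk
          rw [hkeyb x hx, hkeyb y hy] at hk
          exact Or.inl hk
        · rw [List.pairwise_append]
          refine ⟨?_, ?_, ?_⟩
          · refine hqpw.imp_of_mem ?_
            intro a b ha hb hab _
            show ltP bts (a, ent' a) (b, ent' b)
            rw [hentq a ha, hentq b hb]
            exact hab
          · refine hMApw.imp_of_mem ?_
            intro a b ha hb hab hkeq
            rw [hkeyb a (List.mem_append_right q ha), hkeyb b (List.mem_append_right q hb)] at hkeq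
            exact Or.inr ⟨hkeq, Or.inr ⟨by rw [hentM a ha, hentM b hb], hab⟩⟩
          · intro a ha b hb hkeq
            rw [hkeyb a (List.mem_append_left _ ha), hkeyb b (List.mem_append_right q hb)] at hkeq
            refine Or.inr ⟨hkeq, Or.inl ?_⟩
            rw [hentq a ha, hentM b hb]
            exact (hqmem a ha).2.2
        · intro x hx y hy hxy
          rw [hkeyb x hx, hkeyb y hy]
          rw [ltE_iff] at hxy
          omega
      have hsortperm : (PySem.List.sorted (q ++ movedA) (fun x => rem.getD x 0) false).Perm
          (q ++ movedA) := PySem.List.sorted_perm _ _ _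
      rcases hzs : PySem.List.sorted (q ++ movedA) (fun x => rem.getD x 0) false with _ | ⟨cur, rest⟩
      · exact absurd ((PySem.List.sorted_eq_nil_iff _ _ _).mp hzs) hqne
      rw [hzs] at hsortpw hsortperm
      have hcurq2 : cur ∈ q ++ movedA := hsortperm.subset List.mem_cons_self
      have hcurn : cur < processes.length := (hq2mem cur hcurq2).1
      have hcurb : 0 < bts.getD cur 0 := (hq2mem cur hcurq2).2
      have hzsnd : (cur :: rest).Nodup :=
        hsortpw.imp (fun {a b} h => fun he => absurd (he ▸ h) (hltE_irr ent' _))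
      -- B side ready pool after the inner pop loop
      have hpermRP : (ready ++ movedB.map (fun i => (i, t))).Perm
          ((q ++ movedA).map (fun i => (i, ent' i))) := by
        rw [List.map_append]
        have hmapq : q.map (fun i => (i, ent i)) = q.map (fun i => (i, ent' i)) :=
          List.map_congr_left (fun i h => by rw [hentq i h])
        have hmapM : movedA.map (fun i => ((i : Nat), t)) = movedA.map (fun i => (i, ent' i)) :=
          List.map_congr_left (fun i h => by rw [hentM i h])
        refine List.Perm.append ?_ ?_
        · refine hready.trans ?_
          rw [hmapq]
        · refine (hpermM.map _).trans ?_
          rw [hmapM]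
      have hpermZP : (ready ++ movedB.map (fun i => (i, t))).Perm
          ((cur :: rest).map (fun i => (i, ent' i))) :=
        hpermRP.trans (hsortperm.symm.map _)
      rcases hRP : ready ++ movedB.map (fun i => (i, t)) with _ | ⟨r0, rrest⟩
      · exfalso
        rw [hRP] at hpermZP
        simpa using hpermZP.length_eq
      rw [hRP] at hpermZP
      obtain ⟨hminmem, hminopt⟩ := foldMin_spec bts r0 rrest
      have hzsPpw : ((cur :: rest).map (fun i => (i, ent' i))).Pairwise (ltP bts) := by
        refine hsortpw.map _ ?_
        intro a b h
        exact h
      have hres_eq : rrest.foldl (fun best p => if sjnAltBetter bts p best then p else best) r0 =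
          (cur, ent' cur) := by
        have hresZ : rrest.foldl (fun best p => if sjnAltBetter bts p best then p else best) r0 ∈
            (cur :: rest).map (fun i => (i, ent' i)) := hpermZP.subset hminmem
        rw [List.map_cons] at hresZ
        rcases List.mem_cons.mp hresZ with h | h
        · exact h
        · exfalso
          have hhead : ltP bts (cur, ent' cur)
              (rrest.foldl (fun best p => if sjnAltBetter bts p best then p else best) r0) := by
            have h2 := hzsPpw
            rw [List.map_cons] at h2
            exact (List.pairwise_cons.mp h2).1 _ h
          have hmemh : (cur, ent' cur) ∈ r0 :: rrest := by
            refine hpermZP.symm.subset ?_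
            rw [List.map_cons]
            exact List.mem_cons_self
          exact hminopt _ hmemh hhead
      have hcnr : cur ∉ rest := (List.nodup_cons.mp hzsnd).1
      have hfilters : ((r0 :: rrest).filter (fun p => decide (p.1 ≠ cur))).Perm
          (rest.map (fun i => (i, ent' i))) := by
        have h1 : ((cur, ent' cur) :: rest.map (fun i => (i, ent' i))).filter
            (fun p => decide (p.1 ≠ cur)) = rest.map (fun i => (i, ent' i)) := by
          rw [List.filter_cons]
          rw [if_neg (by simp)]
          refine List.filter_eq_self.mpr ?_
          intro p hp
          obtain ⟨i, hi, rfl⟩ := List.mem_map.mp hp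
          exact decide_eq_true (fun he => hcnr (he ▸ hi))
        refine (hpermZP.filter _).trans ?_
        rw [List.map_cons] at hpermZP ⊢
        rw [h1]
      have hP2sub : pending2.Sublist pending := by
        rw [hP2def]; exact List.dropWhile_sublist _
      -- one step of A
      have hAstep : sjnLoop processes bts ats processes.length (fa + 1) rem t q inq comp tat wt log
          = sjnLoop processes bts ats processes.length fa (rem.set cur 0) (t + bts.getD cur 0) rest
              (sjnAdd ats rem t (List.range processes.length) q inq).2
              (comp.set cur (t + bts.getD cur 0))
              (tat.set cur (t + bts.getD cur 0 - ats.getD cur 0))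
              (wt.set cur (t + bts.getD cur 0 - ats.getD cur 0 - bts.getD cur 0))
              (log ++ [(processes.getD cur "", t, t + bts.getD cur 0)]) := by
        simp only [sjnLoop]
        rw [if_neg (fun h => hqq h.1)]
        rw [hq1', hzs]
      rcases fuelB with _ | fb
      · exfalso; omega
      have hqnilOfReady : ready = [] → q = [] := by
        intro hr
        rw [hr] at hready
        have h1 : (q.map (fun i => (i, ent i))).Perm [] := hready.symm
        exact List.map_eq_nil_iff.mp h1.eq_nil
      have hBne : ¬ (pending = [] ∧ ready = []) := by
        rintro ⟨hp, hr⟩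
        have hq0 : q = [] := hqnilOfReady hr
        have hMA0 : movedA = [] := by
          rw [hMAdef]
          refine List.filter_eq_nil_iff.mpr ?_
          intro i _
          simp [hp]
        exact hqne (by rw [hq0, hMA0]; rfl)
      have hBnj : ∀ p ps, pending = p :: ps → ready = [] → ¬ t < ats.getD p 0 := by
        intro p ps hp hr hlt
        have hq0 : q = [] := hqnilOfReady hr
        have hMAne : movedA ≠ [] := by
          intro h
          exact hqne (by rw [hq0, h]; rfl)
        obtain ⟨j, hj⟩ := List.exists_mem_of_ne_nil movedA hMAne
        obtain ⟨hjp, hjt⟩ := (hmemMA j).mp hj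
        rw [hp] at hjp
        rcases List.mem_cons.mp hjp with rfl | hjtail
        · omega
        · have hppw' := hppw
          rw [hp] at hppw'
          have := (List.pairwise_cons.mp hppw').1 j hjtail
          unfold lexA at this
          omega
      rw [sjnAltLoop_step processes bts ats fb pending ready t comp tat wt log hBne hBnj]
      -- one step of B
      have hBstep : altBody processes bts ats fb pending ready t comp tat wt log =
          sjnAltLoop processes bts ats fb pending2
            ((r0 :: rrest).filter (fun p => decide (p.1 ≠ cur))) (t + bts.getD cur 0)
            (comp.set cur (t + bts.getD cur 0))
            (tat.set cur (t + bts.getD cur 0 - ats.getD cur 0))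
            (wt.set cur (t + bts.getD cur 0 - ats.getD cur 0 - bts.getD cur 0))
            (log ++ [(processes.getD cur "", t, t + bts.getD cur 0)]) := by
        simp only [altBody]
        rw [sjnAltSpan_eq]
        rw [← hMBdef, ← hP2def, hRP]
        simp only [hres_eq]
      rw [hAstep, hBstep]
      clear hAstep hBstep
      -- re-establish the invariant and recurse
      have hcurlt : cur < rem.length := by rw [hremlen]; omega
      have hsetiff : ∀ i, (i ∈ pending ∨ i ∈ q) ↔ (i ∈ pending2 ∨ i ∈ cur :: rest) := by
        intro i
        have h1 : i ∈ pending ↔ i ∈ movedB ∨ i ∈ pending2 := by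
          rw [← List.mem_append, hMBdef, hP2def, List.takeWhile_append_dropWhile]
        have h2 : i ∈ cur :: rest ↔ i ∈ q ++ movedA :=
          ⟨fun h => hsortperm.subset h, fun h => hsortperm.symm.subset h⟩
        have h4 : i ∈ movedB ↔ i ∈ movedA := hpermM.mem_iff
        constructor
        · rintro (hp | hq')
          · rcases h1.mp hp with hM | hP2
            · exact Or.inr (h2.mpr (List.mem_append_right q (h4.mp hM)))
            · exact Or.inl hP2
          · exact Or.inr (h2.mpr (List.mem_append_left _ hq'))
        · rintro (hP2 | hcr)
          · exact Or.inl (h1.mpr (Or.inr hP2))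
          · rcases List.mem_append.mp (h2.mp hcr) with hq' | hM
            · exact Or.inr hq'
            · exact Or.inl (h1.mpr (Or.inl (h4.mpr hM)))
      have hcurNotP2 : cur ∉ pending2 := by
        intro hc
        rcases List.mem_append.mp hcurq2 with h | h
        · exact absurd h (hpmem cur (hP2sub.subset hc)).2.2
        · exact hdisjBP (hpermM.mem_iff.mpr h) hc
      have hrem2 : ∀ i, i < (rem.set cur 0).length →
          (rem.set cur 0).getD i 0 = if i ∈ pending2 ∨ i ∈ rest then bts.getD i 0 else 0 := by
        intro i hi
        rw [List.length_set] at hi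
        by_cases hic : i = cur
        · subst hic
          rw [getD_set_self_of_lt hcurlt]
          rw [if_neg (by rintro (h | h); exacts [hcurNotP2 h, hcnr h])]
        · rw [getD_set_ne (fun h => hic h.symm)]
          rw [hrem i hi]
          have hiff : (i ∈ pending ∨ i ∈ q) ↔ (i ∈ pending2 ∨ i ∈ rest) := by
            rw [hsetiff i, List.mem_cons]
            have : ¬ i = cur := hic
            tauto
          by_cases hc : i ∈ pending2 ∨ i ∈ rest
          · rw [if_pos (hiff.mpr hc), if_pos hc]
          · rw [if_neg (fun h => hc (hiff.mp h)), if_neg hc]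
      have hinq2 : ∀ i, i < processes.length →
          (sjnAdd ats rem t (List.range processes.length) q inq).2.getD i false =
            decide (i ∉ pending2 ∧ 0 < bts.getD i 0) := by
        intro i hi
        rw [hq3 i, hinq i hi, ← Bool.decide_or]
        have hPchar' := hPchar i hi
        rw [hinq i hi] at hPchar'
        refine decide_eq_decide.mpr ?_
        constructor
        · rintro (⟨hnp, hb⟩ | ⟨_, hcond⟩)
          · exact ⟨fun h => hnp (hP2sub.subset h), hb⟩
          · obtain ⟨hp, ha⟩ := hPchar'.mp hcond
            exact ⟨fun h2 => hdisjBP ((hmemMB i).mpr ⟨hp, ha⟩) h2, (hpmem i hp).2.1⟩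
        · rintro ⟨hnp2, hb⟩
          by_cases hp : i ∈ pending
          · right
            have hiM : i ∈ movedB := by
              have h1 : i ∈ movedB ∨ i ∈ pending2 := by
                rw [← List.mem_append, hMBdef, hP2def, List.takeWhile_append_dropWhile]
                exact hp
              rcases h1 with h | h
              · exact h
              · exact absurd h hnp2
            have ha : ats.getD i 0 ≤ t := ((hmemMB i).mp hiM).2
            exact ⟨List.mem_range.mpr hi, hPchar'.mpr ⟨hp, ha⟩⟩
          · exact Or.inl ⟨hp, hb⟩
      have hqmem2 : ∀ i ∈ rest,
          i < processes.length ∧ 0 < bts.getD i 0 ∧ ent' i < t + bts.getD cur 0 := by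
        intro i hi
        have hiq2 : i ∈ q ++ movedA := hsortperm.subset (List.mem_cons_of_mem _ hi)
        refine ⟨(hq2mem i hiq2).1, (hq2mem i hiq2).2, ?_⟩
        have hle : ent' i ≤ t := by
          rw [hEdef]
          by_cases h : i ∈ movedA
          · simp [h]
          · simp only [h, if_false]
            rcases List.mem_append.mp hiq2 with hq' | hm
            · exact le_of_lt (hqmem i hq').2.2
            · exact absurd hm h
        omega
      have hqpw2 : rest.Pairwise (ltE bts ent') := (List.pairwise_cons.mp hsortpw).2
      have hpmem2 : ∀ j ∈ pending2, j < processes.length ∧ 0 < bts.getD j 0 ∧ j ∉ rest := by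
        intro j hj
        have hjp : j ∈ pending := hP2sub.subset hj
        refine ⟨(hpmem j hjp).1, (hpmem j hjp).2.1, ?_⟩
        intro hjr
        have hjq2 : j ∈ q ++ movedA := hsortperm.subset (List.mem_cons_of_mem _ hjr)
        rcases List.mem_append.mp hjq2 with h | h
        · exact (hpmem j hjp).2.2 h
        · exact hdisjBP (hpermM.mem_iff.mpr h) hj
      have hppw2 : pending2.Pairwise (lexA ats) := hppw.sublist hP2sub
      have hlenP : movedB.length + pending2.length = pending.length := by
        have h := congrArg List.length (List.takeWhile_append_dropWhile
          (p := fun p => decide (ats.getD p 0 ≤ t)) (l := pending))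
        rw [List.length_append] at h
        rw [hMBdef, hP2def]
        exact h
      have hlenZ : rest.length + 1 = q.length + movedA.length := by
        have h := hsortperm.length_eq
        simp only [List.length_cons, List.length_append] at h
        omega
      have hlenM : movedB.length = movedA.length := hpermM.length_eq
      have hlenR : ready.length = q.length := by
        have h := hready.length_eq
        simpa using h
      have hlenF : ((r0 :: rrest).filter (fun p => decide (p.1 ≠ cur))).length = rest.length := by
        have h := hfilters.length_eq
        simpa using h
      have hfA2 : (((ats.foldl (fun m x => max m x.natAbs) 0 : Nat) : Int)
            - (t + bts.getD cur 0)).toNat + 2 * (pending2.length + rest.length) + 1 ≤ fa := by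
        omega
      have hfB2 : pending2.length +
          ((r0 :: rrest).filter (fun p => decide (p.1 ≠ cur))).length + 1 ≤ fb := by
        rw [hlenF]
        omega
      exact ih fb (t + bts.getD cur 0) (rem.set cur 0) rest
        (sjnAdd ats rem t (List.range processes.length) q inq).2 pending2
        ((r0 :: rrest).filter (fun p => decide (p.1 ≠ cur))) ent'
        (comp.set cur (t + bts.getD cur 0))
        (tat.set cur (t + bts.getD cur 0 - ats.getD cur 0))
        (wt.set cur (t + bts.getD cur 0 - ats.getD cur 0 - bts.getD cur 0))
        (log ++ [(processes.getD cur "", t, t + bts.getD cur 0)])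
        (by rw [List.length_set, hremlen]) (by rw [hq2, hinql]) hrem2 hinq2 hqmem2 hqpw2
        hfilters hpmem2 hppw2 hfA2 hfB2





-- ===== VERDICT (by name: the statement is the Claim_ definition above) =====
theorem sjn_spec : Claim_equal_sjn := by
  intro processes bts ats _hdom hpre
  obtain ⟨h1, h2, h3, h4⟩ := hpre
  unfold Spec_sjn
  have hb_nonneg : ∀ i, i < processes.length → 0 ≤ bts.getD i 0 := by
    intro i hi
    have hilen : i < bts.length := by omega
    rw [List.getD_eq_getElem _ _ hilen]
    apply h3
    have hlt : i < (bts.take processes.length).length := by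
      simp [List.length_take]; omega
    have he : (bts.take processes.length)[i] = bts[i] := List.getElem_take
    exact he ▸ List.getElem_mem hlt
  have hb_tail : ∀ i, processes.length ≤ i → bts.getD i 0 = 0 := by
    intro i hi
    by_cases hil : i < bts.length
    · rw [List.getD_eq_getElem _ _ hil]
      apply h4
      have hlt : i - processes.length < (bts.drop processes.length).length := by
        simp [List.length_drop]; omega
      have hmem := List.getElem_mem hlt
      have he : (bts.drop processes.length)[i - processes.length] = bts[i] := by
        rw [List.getElem_drop]
        congr 1
        omega
      exact he ▸ hmem
    · exact List.getD_eq_default _ _ (by omega)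
  have hmemp0 : ∀ j, j ∈ PySem.List.sorted
      ((List.range processes.length).filter (fun i => decide (0 < bts.getD i 0)))
      (fun i => ats.getD i 0) false ↔ (j < processes.length ∧ 0 < bts.getD j 0) := by
    intro j
    rw [PySem.List.mem_sorted, List.mem_filter, List.mem_range]
    constructor
    · rintro ⟨ha, hb⟩; exact ⟨ha, of_decide_eq_true hb⟩
    · rintro ⟨ha, hb⟩; exact ⟨ha, decide_eq_true hb⟩
  have hppw0 : (PySem.List.sorted
      ((List.range processes.length).filter (fun i => decide (0 < bts.getD i 0)))
      (fun i => ats.getD i 0) false).Pairwise (lexA ats) := by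
    apply sorted_pairwise_of
    · intro x _ y _ hk; exact Or.inl hk
    · exact (List.pairwise_lt_range.sublist List.filter_sublist).imp
        (fun h hkeq => Or.inr ⟨hkeq, h⟩)
    · intro x _ y _ h; unfold lexA at h; omega
  have hp0len : (PySem.List.sorted
      ((List.range processes.length).filter (fun i => decide (0 < bts.getD i 0)))
      (fun i => ats.getD i 0) false).length ≤ processes.length := by
    rw [PySem.List.length_sorted]
    calc ((List.range processes.length).filter _).length
        ≤ (List.range processes.length).length := List.length_filter_le _ _
      _ = processes.length := List.length_range
  simp only [sjn, sjn_alt]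
  refine sim processes bts ats hb_nonneg hb_tail h1 h2
    ((ats.foldl (fun m x => max m x.natAbs) 0) + 2 * processes.length + 2)
    (processes.length + 1) 0 bts [] (List.replicate processes.length false)
    (PySem.List.sorted ((List.range processes.length).filter (fun i => decide (0 < bts.getD i 0)))
      (fun i => ats.getD i 0) false)
    [] (fun _ => 0) (List.replicate processes.length 0) (List.replicate processes.length 0)
    (List.replicate processes.length 0) [] rfl (List.length_replicate) ?_ ?_
    (fun i hi => absurd hi List.not_mem_nil) List.Pairwise.nil (by simp) ?_ hppw0 ?_ ?_
  · -- rem invariant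
    intro i hi
    by_cases hm : i ∈ PySem.List.sorted
        ((List.range processes.length).filter (fun i => decide (0 < bts.getD i 0)))
        (fun i => ats.getD i 0) false ∨ i ∈ ([] : List Nat)
    · rw [if_pos hm]
    · rw [if_neg hm]
      by_cases hin : i < processes.length
      · have hnb : ¬ 0 < bts.getD i 0 := by
          intro hb
          exact hm (Or.inl ((hmemp0 i).mpr ⟨hin, hb⟩))
        have := hb_nonneg i hin
        omega
      · exact hb_tail i (by omega)
  · -- in_queue invariant
    intro i hi
    rw [List.getD_eq_getElem _ _ (by rw [List.length_replicate]; omega), List.getElem_replicate]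
    symm
    rw [decide_eq_false_iff_not]
    rintro ⟨hnp, hb⟩
    exact hnp ((hmemp0 i).mpr ⟨hi, hb⟩)
  · -- pending members
    intro j hj
    obtain ⟨hjn, hjb⟩ := (hmemp0 j).mp hj
    exact ⟨hjn, hjb, List.not_mem_nil⟩
  · -- fuel A
    simp only [List.length_nil]
    omega
  · -- fuel B
    simp only [List.length_nil]
    omega
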